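-- pv_equiv track=rewrite | github.com/ndnhuy/problem-solving | problems/ClimbingTheLeaderBoard/solution.py | findRankFromBeginning
-- ===== SOURCE A (Python) =====
-- def findRankFromBeginning(scores, aliceScore):
--   rank = 1
--   i = 0
--   while (scores[i] > aliceScore):
--     i = i + 1
--
--     if i >= len(scores):
--       return {
--         'index': len(scores),
--         'rank': rank + 1
--       }
--
--     if scores[i] != scores[i-1]:
--       rank = rank + 1
--
--   return {
--     'index': i,
--     'rank': rank
--   }
-- ===== SOURCE B (Python) =====
-- # Run-length-encode the leaderboard once, then scan whole runs instead of
-- # single entries: each run is one dense rank, so index advances by the run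
-- # length and rank by one per run passed.
-- def findRankFromBeginning(scores, aliceScore):
--     runs = []
--     for s in scores:
--         if runs and runs[-1][0] == s:
--             runs[-1] = (s, runs[-1][1] + 1)
--         else:
--             runs.append((s, 1))
--     index = 0
--     rank = 1
--     for v, c in runs:
--         if v <= aliceScore:
--             return {'index': index, 'rank': rank}
--         index += c
--         rank += 1
--     return {'index': index, 'rank': rank}
-- ===== Notes on version B (the rewrite author's own statement) =====
-- stated objective: alternative
-- what changed: Replaces A's index-stepping while loop with per-entry rank bookkeeping by a run-length encoding of the scores followed by a scan over whole runs (index advances by run length, rank by one per run).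
import Mathlib
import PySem

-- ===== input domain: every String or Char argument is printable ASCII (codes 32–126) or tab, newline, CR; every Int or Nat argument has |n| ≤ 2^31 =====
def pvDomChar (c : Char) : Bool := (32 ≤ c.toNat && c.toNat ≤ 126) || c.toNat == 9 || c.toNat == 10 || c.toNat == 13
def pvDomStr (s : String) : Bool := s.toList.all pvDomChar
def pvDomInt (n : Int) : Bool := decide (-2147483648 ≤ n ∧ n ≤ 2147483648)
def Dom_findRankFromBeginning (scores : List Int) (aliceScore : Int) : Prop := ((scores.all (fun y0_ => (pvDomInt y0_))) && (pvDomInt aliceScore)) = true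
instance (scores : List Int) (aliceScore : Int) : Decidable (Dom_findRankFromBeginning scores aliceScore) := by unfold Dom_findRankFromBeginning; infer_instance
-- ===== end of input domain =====

-- B replaces A's index-stepping while loop by a run-length encoding of the scores
-- followed by a scan over whole runs; equivalence of the return value is proved on
-- nonempty lists (A raises IndexError on []).

-- ===== PORT A =====
-- Python's while loop over index i; recursion decreases scores.length - i.
-- scores[i]? = none only when scores = [] and i = 0, where Python raises IndexError
-- (excluded by Pre_); the port returns [] there.
def findRankFromBeginningLoop (scores : List Int) (aliceScore : Int) (i : Nat) (rank : Int) : List (String × Int) :=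
  match h : scores[i]? with
  | none => []
  | some s =>
    if s > aliceScore then
      if i + 1 ≥ scores.length then
        [("index", (scores.length : Int)), ("rank", rank + 1)]
      else
        if scores.getD (i+1) 0 ≠ scores.getD i 0 then
          findRankFromBeginningLoop scores aliceScore (i+1) (rank + 1)
        else
          findRankFromBeginningLoop scores aliceScore (i+1) rank
    else [("index", (i : Int)), ("rank", rank)]
  termination_by scores.length - i
  decreasing_by
    · obtain ⟨hlt, -⟩ := List.getElem?_eq_some_iff.mp h; omega
    · obtain ⟨hlt, -⟩ := List.getElem?_eq_some_iff.mp h; omega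

def findRankFromBeginning (scores : List Int) (aliceScore : Int) : List (String × Int) :=
  findRankFromBeginningLoop scores aliceScore 0 1

-- ===== PORT B =====
-- one step of Source B's run-building loop: bump the last run or append a new one
def stepRun (runs : List (Int × Int)) (s : Int) : List (Int × Int) :=
  match runs.getLast? with
  | some (v, c) => if v = s then runs.dropLast ++ [(s, c + 1)] else runs ++ [(s, 1)]
  | none => [(s, 1)]

def buildRuns (scores : List Int) : List (Int × Int) :=
  scores.foldl stepRun []

-- Source B's second loop over the runs
def scanRuns (aliceScore : Int) : List (Int × Int) → Int → Int → List (String × Int)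
  | [], index, rank => [("index", index), ("rank", rank)]
  | (v, c) :: rest, index, rank =>
    if v ≤ aliceScore then [("index", index), ("rank", rank)]
    else scanRuns aliceScore rest (index + c) (rank + 1)

def findRankFromBeginning_alt (scores : List Int) (aliceScore : Int) : List (String × Int) :=
  scanRuns aliceScore (buildRuns scores) 0 1

-- ===== PRECONDITION & SPEC =====
-- Pre_ excludes only the empty list, on which Python A raises IndexError at scores[0].
def Pre_findRankFromBeginning (scores : List Int) (aliceScore : Int) : Prop := scores ≠ []
instance (scores : List Int) (aliceScore : Int) : Decidable (Pre_findRankFromBeginning scores aliceScore) := by unfold Pre_findRankFromBeginning; infer_instance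
def pvWitness_findRankFromBeginning : List Int × Int := ([100, 90, 90, 80], 85)

def Spec_findRankFromBeginning (scores : List Int) (aliceScore : Int) (out : List (String × Int)) : Prop := out = findRankFromBeginning_alt scores aliceScore
instance (scores : List Int) (aliceScore : Int) (out : List (String × Int)) : Decidable (Spec_findRankFromBeginning scores aliceScore out) := by unfold Spec_findRankFromBeginning; infer_instance

-- ===== CLAIM (what is proved, stated in full; the proofs are below) =====
def Claim_equal_findRankFromBeginning : Prop := ∀ (scores : List Int) (aliceScore : Int), Dom_findRankFromBeginning scores aliceScore → Pre_findRankFromBeginning scores aliceScore → Spec_findRankFromBeginning scores aliceScore (findRankFromBeginning scores aliceScore)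

-- ===== LEMMAS AND PROOFS =====

-- common core both ports reduce to: walk the suffix, x = current entry at absolute index idx
def core (aliceScore : Int) : Int → List Int → Int → Int → List (String × Int)
  | x, rest, idx, rank =>
    if x ≤ aliceScore then [("index", idx), ("rank", rank)]
    else
      match rest with
      | [] => [("index", idx + 1), ("rank", rank + 1)]
      | y :: rest' => core aliceScore y rest' (idx + 1) (if y = x then rank else rank + 1)

-- head-recursive run-length encoding (the proof's view of buildRuns)
def fcons (x : Int) : List (Int × Int) → List (Int × Int)
  | [] => [(x, 1)]
  | (v, c) :: g => if v = x then (x, c + 1) :: g else (x, 1) :: (v, c) :: g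

def groupRuns : List Int → List (Int × Int)
  | [] => []
  | x :: t => fcons x (groupRuns t)

theorem stepRun_cons (v : Int) (c : Int) (t : List (Int × Int)) (s : Int) (ht : t ≠ []) :
    stepRun ((v, c) :: t) s = (v, c) :: stepRun t s := by
  match t, ht with
  | (w, d) :: t', _ =>
    unfold stepRun
    rw [List.getLast?_cons_cons]
    match h : ((w, d) :: t').getLast? with
    | none => simp at h
    | some (u, e) =>
      simp only [h]
      split_ifs <;> simp

theorem fcons_stepRun_comm (x s : Int) (R : List (Int × Int)) :
    fcons x (stepRun R s) = stepRun (fcons x R) s := by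
  match R with
  | [] =>
    by_cases hsx : s = x
    · subst hsx; simp [stepRun, fcons, List.getLast?]
    · simp [stepRun, fcons, List.getLast?, hsx, Ne.symm hsx]
  | [(v, c)] =>
    by_cases hvs : v = s <;> by_cases hvx : v = x <;> by_cases hsx : s = x <;>
      simp_all [stepRun, fcons, List.getLast?]
  | (v, c) :: (w, d) :: g =>
    rw [stepRun_cons v c ((w,d)::g) s (by simp)]
    by_cases hvx : v = x
    · subst hvx
      show fcons v ((v, c) :: stepRun ((w, d) :: g) s)
          = stepRun (fcons v ((v, c) :: (w, d) :: g)) s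
      have h1 : fcons v ((v, c) :: stepRun ((w, d) :: g) s)
          = (v, c + 1) :: stepRun ((w, d) :: g) s := by simp [fcons]
      have h2 : fcons v ((v, c) :: (w, d) :: g) = (v, c + 1) :: (w, d) :: g := by simp [fcons]
      rw [h1, h2, stepRun_cons v (c+1) ((w,d)::g) s (by simp)]
    · show fcons x ((v, c) :: stepRun ((w, d) :: g) s)
          = stepRun (fcons x ((v, c) :: (w, d) :: g)) s
      have h1 : fcons x ((v, c) :: stepRun ((w, d) :: g) s)
          = (x, 1) :: (v, c) :: stepRun ((w, d) :: g) s := by simp [fcons, hvx]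
      have h2 : fcons x ((v, c) :: (w, d) :: g) = (x, 1) :: (v, c) :: (w, d) :: g := by
        simp [fcons, hvx]
      rw [h1, h2, stepRun_cons x 1 ((v,c)::(w,d)::g) s (by simp),
          stepRun_cons v c ((w,d)::g) s (by simp)]

theorem groupRuns_append_singleton (xs : List Int) (s : Int) :
    groupRuns (xs ++ [s]) = stepRun (groupRuns xs) s := by
  induction xs with
  | nil => simp [groupRuns, fcons, stepRun]
  | cons x t ih =>
    show fcons x (groupRuns (t ++ [s])) = stepRun (fcons x (groupRuns t)) s
    rw [ih, fcons_stepRun_comm]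

theorem buildRuns_eq_groupRuns (xs : List Int) : buildRuns xs = groupRuns xs := by
  induction xs using List.reverseRecOn with
  | nil => rfl
  | append_singleton t s ih =>
    unfold buildRuns
    rw [List.foldl_append]
    show stepRun (buildRuns t) s = _
    rw [ih, groupRuns_append_singleton]

theorem groupRuns_cons_head (y : Int) (t : List Int) :
    ∃ c g, groupRuns (y :: t) = (y, c) :: g := by
  show ∃ c g, fcons y (groupRuns t) = (y, c) :: g
  match groupRuns t with
  | [] => exact ⟨1, [], rfl⟩
  | (v, c) :: g =>
    by_cases h : v = y
    · exact ⟨c + 1, g, by simp [fcons, h]⟩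
    · exact ⟨1, (v, c) :: g, by simp [fcons, h]⟩

-- B-side: scanning the runs of x :: rest is the core walk
theorem scan_group_eq_core (aliceScore : Int) (rest : List Int) :
    ∀ (x idx rank : Int),
      scanRuns aliceScore (groupRuns (x :: rest)) idx rank = core aliceScore x rest idx rank := by
  induction rest with
  | nil =>
    intro x idx rank
    show scanRuns aliceScore (fcons x []) idx rank = _
    by_cases h : x ≤ aliceScore
    · simp [fcons, scanRuns, core, h]
    · simp [fcons, scanRuns, core, h]
  | cons y t ih =>
    intro x idx rank
    obtain ⟨c, g, hg⟩ := groupRuns_cons_head y t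
    by_cases hx : x ≤ aliceScore
    · obtain ⟨c', g', hg'⟩ := groupRuns_cons_head x (y :: t)
      rw [hg']
      simp [scanRuns, core, hx]
    · by_cases hyx : y = x
      · subst hyx
        have hgr : groupRuns (y :: y :: t) = (y, c + 1) :: g := by
          show fcons y (groupRuns (y :: t)) = _
          rw [hg]; simp [fcons]
        rw [hgr]
        have hih := ih y (idx + 1) rank
        rw [hg] at hih
        simp only [scanRuns, if_neg hx] at hih
        have h1 : scanRuns aliceScore ((y, c + 1) :: g) idx rank
            = scanRuns aliceScore g (idx + 1 + c) (rank + 1) := by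
          simp only [scanRuns, if_neg hx]; congr 1; ring
        rw [h1, hih]
        simp [core, hx]
      · have hgr : groupRuns (x :: y :: t) = (x, 1) :: (y, c) :: g := by
          show fcons x (groupRuns (y :: t)) = _
          rw [hg]; simp [fcons, hyx]
        rw [hgr]
        have hih := ih y (idx + 1) (rank + 1)
        rw [hg] at hih
        have h1 : scanRuns aliceScore ((x, 1) :: (y, c) :: g) idx rank
            = scanRuns aliceScore ((y, c) :: g) (idx + 1) (rank + 1) := by
          simp only [scanRuns, if_neg hx]
        rw [h1, hih]
        simp [core, hx, hyx]

-- A-side: the index loop on a suffix is the core walk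
theorem loop_eq_core (scores : List Int) (aliceScore : Int) (rest : List Int) :
    ∀ (i : Nat) (x rank : Int), scores.drop i = x :: rest →
      findRankFromBeginningLoop scores aliceScore i rank = core aliceScore x rest (i : Int) rank := by
  induction rest with
  | nil =>
    intro i x rank hdrop
    have hi : scores[i]? = some x := by
      have h0 : (scores.drop i)[0]? = scores[i+0]? := List.getElem?_drop
      rw [hdrop] at h0
      simpa using h0.symm
    have hlt : i < scores.length := by
      obtain ⟨h, -⟩ := List.getElem?_eq_some_iff.mp hi; exact h
    have hlen : scores.length = i + 1 := by
      have := congrArg List.length hdrop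
      simp [List.length_drop] at this
      omega
    rw [findRankFromBeginningLoop]
    split
    · rename_i heq
      rw [hi] at heq; cases heq
    · rename_i s heq
      rw [hi] at heq
      injection heq with hsx
      subst hsx
      by_cases hx : x > aliceScore
      · rw [if_pos hx, if_pos (by omega)]
        simp [core, hlen, not_le.mpr hx]
      · rw [if_neg hx]
        simp [core, le_of_not_gt hx]
  | cons y t ih =>
    intro i x rank hdrop
    have hi : scores[i]? = some x := by
      have h0 : (scores.drop i)[0]? = scores[i+0]? := List.getElem?_drop
      rw [hdrop] at h0
      simpa using h0.symm
    have hdrop' : scores.drop (i + 1) = y :: t := by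
      have h2 : scores.drop (i + 1) = (scores.drop i).drop 1 := by
        rw [List.drop_drop]
      rw [h2, hdrop]; rfl
    have hi1 : scores[i+1]? = some y := by
      have h0 : (scores.drop (i+1))[0]? = scores[(i+1)+0]? := List.getElem?_drop
      rw [hdrop'] at h0
      simpa using h0.symm
    have hlen : i + 1 < scores.length := by
      obtain ⟨h, -⟩ := List.getElem?_eq_some_iff.mp hi1; exact h
    have hgi : scores.getD i 0 = x := by simp [List.getD, hi]
    have hgi1 : scores.getD (i+1) 0 = y := by simp [List.getD, hi1]
    rw [findRankFromBeginningLoop]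
    split
    · rename_i heq
      rw [hi] at heq; cases heq
    · rename_i s heq
      rw [hi] at heq
      injection heq with hsx
      subst hsx
      by_cases hx : x > aliceScore
      · rw [if_pos hx, if_neg (by omega)]
        rw [hgi, hgi1]
        have hcore : core aliceScore x (y :: t) (i : Int) rank
            = core aliceScore y t ((i : Int) + 1) (if y = x then rank else rank + 1) := by
          simp [core, not_le.mpr hx]
        rw [hcore]
        by_cases hyx : y = x
        · rw [if_neg (by simp [hyx]), ih (i+1) y rank hdrop']
          simp [hyx]
        · rw [if_pos hyx, ih (i+1) y (rank + 1) hdrop']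
          simp [hyx]
      · rw [if_neg hx]
        simp [core, le_of_not_gt hx]

-- ===== VERDICT (by name: the statement is the Claim_ definition above) =====
theorem findRankFromBeginning_spec : Claim_equal_findRankFromBeginning := by
  intro scores aliceScore _ hpre
  unfold Spec_findRankFromBeginning
  match hs : scores with
  | [] => exact absurd rfl hpre
  | x :: rest =>
    show findRankFromBeginningLoop (x :: rest) aliceScore 0 1
        = scanRuns aliceScore (buildRuns (x :: rest)) 0 1
    rw [buildRuns_eq_groupRuns, scan_group_eq_core,
        loop_eq_core (x :: rest) aliceScore rest 0 x 1 (by rfl)]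
    rfl
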